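-- pv_equiv track=rewrite | github.com/bpamos/redis-terraform-projects | redis-cloud/redis-cloud-migration-demo/modules/cutover_ui/scripts/enhanced_ui_server_redesigned.py | parse_redis_config_from_env
-- ===== SOURCE A (Python) =====
-- from typing import Dict, Optional, Tuple, Any, List
--
-- def parse_redis_config_from_env(env_content: str) -> Dict[str, str]:
--     """
--     Parse Redis configuration from environment content.
--
--     Args:
--         env_content: Content of the environment file
--
--     Returns:
--         Dict with Redis host, port, and password
--     """
--     config = {"host": "", "port": "", "password": ""}
--
--     for line in env_content.split('\n'):
--         line = line.strip()
--         if line.startswith('REDIS_HOST='):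
--             config["host"] = line.split('=', 1)[1].strip()
--         elif line.startswith('REDIS_PORT='):
--             config["port"] = line.split('=', 1)[1].strip()
--         elif line.startswith('REDIS_PASSWORD='):
--             config["password"] = line.split('=', 1)[1].strip()
--
--     return config
-- ===== SOURCE B (Python) =====
-- def parse_redis_config_from_env(env_content: str):
--     """Parse Redis config by a per-field backward search (last match wins)."""
--     lines = [raw.strip() for raw in env_content.split('\n')]
--
--     def last_value(prefix):
--         for line in reversed(lines):
--             if line.startswith(prefix):
--                 return line.split('=', 1)[1].strip()
--         return ""
--
--     return {
--         "host": last_value("REDIS_HOST="),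
--         "port": last_value("REDIS_PORT="),
--         "password": last_value("REDIS_PASSWORD="),
--     }
-- ===== Notes on version B (the rewrite author's own statement) =====
-- stated objective: alternative
-- what changed: Replaces A's single forward pass that mutates a three-key dict with three independent backward searches: for each field, scan the stripped lines in reverse and take the first prefix match (which is A's last-wins value), with empty-string default.
import Mathlib
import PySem

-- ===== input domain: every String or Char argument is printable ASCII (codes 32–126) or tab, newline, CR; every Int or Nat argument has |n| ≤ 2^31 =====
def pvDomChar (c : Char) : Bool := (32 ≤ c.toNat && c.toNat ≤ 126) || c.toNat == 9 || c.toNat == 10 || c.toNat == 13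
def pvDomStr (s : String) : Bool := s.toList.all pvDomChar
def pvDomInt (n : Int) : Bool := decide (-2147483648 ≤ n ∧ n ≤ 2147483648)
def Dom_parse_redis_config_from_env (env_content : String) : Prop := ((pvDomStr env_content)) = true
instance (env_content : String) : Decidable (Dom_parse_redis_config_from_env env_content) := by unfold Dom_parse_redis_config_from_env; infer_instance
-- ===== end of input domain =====

-- B replaces A's single forward pass with a mutated dict by three independent backward
-- searches, one per field: the first match scanning the lines in reverse is A's
-- last-wins value (alternative decomposition; same cost).

-- ===== PORT A =====
def parse_redis_config_from_env (env_content : String) : List (String × String) :=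
  (((PySem.Str.split? env_content "\n").getD []).foldl
    (fun (config : PySem.Dict String String) line =>
      let line := PySem.Str.strip line
      if PySem.Str.startswith line "REDIS_HOST=" then
        config.insert "host" (PySem.Str.strip (((PySem.Str.splitMax? line "=" 1).getD []).getD 1 ""))
      else if PySem.Str.startswith line "REDIS_PORT=" then
        config.insert "port" (PySem.Str.strip (((PySem.Str.splitMax? line "=" 1).getD []).getD 1 ""))
      else if PySem.Str.startswith line "REDIS_PASSWORD=" then
        config.insert "password" (PySem.Str.strip (((PySem.Str.splitMax? line "=" 1).getD []).getD 1 ""))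
      else config)
    (PySem.Dict.ofList [("host", ""), ("port", ""), ("password", "")])).items

-- ===== PORT B =====
-- Source B's inner 'last_value': walk the (already reversed) stripped lines, return the
-- first line starting with the pfx, else ""
def pv_lastValue (pfx : String) : List String → String
  | [] => ""
  | l :: rest =>
    if PySem.Str.startswith l pfx then
      PySem.Str.strip (((PySem.Str.splitMax? l "=" 1).getD []).getD 1 "")
    else pv_lastValue pfx rest

def parse_redis_config_from_env_alt (env_content : String) : List (String × String) :=
  let lines := ((PySem.Str.split? env_content "\n").getD []).map PySem.Str.strip
  [("host", pv_lastValue "REDIS_HOST=" lines.reverse),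
   ("port", pv_lastValue "REDIS_PORT=" lines.reverse),
   ("password", pv_lastValue "REDIS_PASSWORD=" lines.reverse)]

-- ===== PRECONDITION & SPEC =====
def Spec_parse_redis_config_from_env (env_content : String) (out : List (String × String)) : Prop := out = parse_redis_config_from_env_alt env_content
instance (env_content : String) (out : List (String × String)) : Decidable (Spec_parse_redis_config_from_env env_content out) := by unfold Spec_parse_redis_config_from_env; infer_instance

-- ===== CLAIM (what is proved, stated in full; the proofs are below) =====
def Claim_equal_parse_redis_config_from_env : Prop := ∀ (env_content : String), Dom_parse_redis_config_from_env env_content → Spec_parse_redis_config_from_env env_content (parse_redis_config_from_env env_content)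

-- ===== LEMMAS AND PROOFS =====

-- the value the last pfx-matching line assigns, if any (proof-side characterisation)
def pvLastOpt (pfx : String) : List String → Option String
  | [] => none
  | l :: rest =>
    (pvLastOpt pfx rest).or
      (if PySem.Str.startswith (PySem.Str.strip l) pfx then
        some (PySem.Str.strip (((PySem.Str.splitMax? (PySem.Str.strip l) "=" 1).getD []).getD 1 ""))
      else none)

-- option form of pv_lastValue
def pvFirstOpt (pfx : String) : List String → Option String
  | [] => none
  | l :: rest =>
    if PySem.Str.startswith l pfx then
      some (PySem.Str.strip (((PySem.Str.splitMax? l "=" 1).getD []).getD 1 ""))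
    else pvFirstOpt pfx rest

theorem pv_lastValue_eq_firstOpt (pfx : String) (ls : List String) :
    pv_lastValue pfx ls = (pvFirstOpt pfx ls).getD "" := by
  induction ls with
  | nil => rfl
  | cons l rest ih =>
    simp only [pv_lastValue, pvFirstOpt]
    split_ifs with h <;> simp [ih]

theorem pvFirstOpt_append (pfx : String) (xs ys : List String) :
    pvFirstOpt pfx (xs ++ ys) = (pvFirstOpt pfx xs).or (pvFirstOpt pfx ys) := by
  induction xs with
  | nil => simp [pvFirstOpt]
  | cons l rest ih =>
    simp only [List.cons_append, pvFirstOpt]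
    split_ifs with h <;> simp [ih]

theorem pvFirstOpt_rev (pfx : String) (lines : List String) :
    pvFirstOpt pfx (lines.map PySem.Str.strip).reverse = pvLastOpt pfx lines := by
  induction lines with
  | nil => rfl
  | cons l rest ih =>
    simp only [List.map_cons, List.reverse_cons, pvFirstOpt_append, ih, pvLastOpt]
    rfl

theorem pv_or_getD (o p : Option String) (a : String) :
    (o.or p).getD a = o.getD (p.getD a) := by
  cases o <;> rfl


theorem pv_excl (s p q : String) (hpq : ¬ (p.toList <+: q.toList)) (hqp : ¬ (q.toList <+: p.toList))
    (h : PySem.Str.startswith s p = true) : PySem.Str.startswith s q = false := by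
  apply Bool.eq_false_iff.mpr
  intro hq
  rw [PySem.Str.startswith_eq] at h hq
  rcases List.prefix_or_prefix_of_prefix ((PySem.Chars.startswith_iff _ _).mp h)
    ((PySem.Chars.startswith_iff _ _).mp hq) with hc | hc
  exacts [hpq hc, hqp hc]

-- A's fold over the three-key dict, characterised field by field
theorem pv_foldA (lines : List String) (a b c : String) :
    (lines.foldl
      (fun (config : PySem.Dict String String) line =>
        let line := PySem.Str.strip line
        if PySem.Str.startswith line "REDIS_HOST=" then
          config.insert "host" (PySem.Str.strip (((PySem.Str.splitMax? line "=" 1).getD []).getD 1 ""))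
        else if PySem.Str.startswith line "REDIS_PORT=" then
          config.insert "port" (PySem.Str.strip (((PySem.Str.splitMax? line "=" 1).getD []).getD 1 ""))
        else if PySem.Str.startswith line "REDIS_PASSWORD=" then
          config.insert "password" (PySem.Str.strip (((PySem.Str.splitMax? line "=" 1).getD []).getD 1 ""))
        else config)
      (PySem.Dict.mk [("host", a), ("port", b), ("password", c)])).items
    = [("host", (pvLastOpt "REDIS_HOST=" lines).getD a),
       ("port", (pvLastOpt "REDIS_PORT=" lines).getD b),
       ("password", (pvLastOpt "REDIS_PASSWORD=" lines).getD c)] := by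
  induction lines generalizing a b c with
  | nil => rfl
  | cons l rest ih =>
    by_cases h1 : PySem.Str.startswith (PySem.Str.strip l) "REDIS_HOST=" = true
    · have n2 : PySem.Str.startswith (PySem.Str.strip l) "REDIS_PORT=" = false :=
        pv_excl _ _ _ (by decide) (by decide) h1
      have n3 : PySem.Str.startswith (PySem.Str.strip l) "REDIS_PASSWORD=" = false :=
        pv_excl _ _ _ (by decide) (by decide) h1
      have hi : (PySem.Dict.mk [("host", a), ("port", b), ("password", c)]).insert "host" (PySem.Str.strip (((PySem.Str.splitMax? (PySem.Str.strip l) "=" 1).getD []).getD 1 ""))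
          = PySem.Dict.mk [("host", PySem.Str.strip (((PySem.Str.splitMax? (PySem.Str.strip l) "=" 1).getD []).getD 1 "")), ("port", b), ("password", c)] := by
        simp [PySem.Dict.insert, PySem.Dict.contains]
      simp only [List.foldl_cons, pvLastOpt, pv_or_getD, h1, n2, n3, if_true,
        Bool.false_eq_true, if_false, Option.getD_some, Option.getD_none]
      rw [hi, ih]
    · by_cases h2 : PySem.Str.startswith (PySem.Str.strip l) "REDIS_PORT=" = true
      · have n3 : PySem.Str.startswith (PySem.Str.strip l) "REDIS_PASSWORD=" = false :=
          pv_excl _ _ _ (by decide) (by decide) h2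
        have hi : (PySem.Dict.mk [("host", a), ("port", b), ("password", c)]).insert "port" (PySem.Str.strip (((PySem.Str.splitMax? (PySem.Str.strip l) "=" 1).getD []).getD 1 ""))
          = PySem.Dict.mk [("host", a), ("port", PySem.Str.strip (((PySem.Str.splitMax? (PySem.Str.strip l) "=" 1).getD []).getD 1 "")), ("password", c)] := by
          simp [PySem.Dict.insert, PySem.Dict.contains]
        simp only [List.foldl_cons, pvLastOpt, pv_or_getD, h1, h2, n3, if_true,
          Bool.false_eq_true, if_false, Option.getD_some, Option.getD_none]
        rw [hi, ih]
      · by_cases h3 : PySem.Str.startswith (PySem.Str.strip l) "REDIS_PASSWORD=" = true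
        · have hi : (PySem.Dict.mk [("host", a), ("port", b), ("password", c)]).insert "password" (PySem.Str.strip (((PySem.Str.splitMax? (PySem.Str.strip l) "=" 1).getD []).getD 1 ""))
            = PySem.Dict.mk [("host", a), ("port", b), ("password", PySem.Str.strip (((PySem.Str.splitMax? (PySem.Str.strip l) "=" 1).getD []).getD 1 ""))] := by
            simp [PySem.Dict.insert, PySem.Dict.contains]
          simp only [List.foldl_cons, pvLastOpt, pv_or_getD, h1, h2, h3, if_true,
            Bool.false_eq_true, if_false, Option.getD_some, Option.getD_none]
          rw [hi, ih]
        · simp only [List.foldl_cons, pvLastOpt, pv_or_getD, h1, h2, h3,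
            Bool.false_eq_true, if_false, Option.getD_none]
          exact ih a b c

-- ===== VERDICT (by name: the statement is the Claim_ definition above) =====
theorem parse_redis_config_from_env_spec : Claim_equal_parse_redis_config_from_env := by
  intro env _
  unfold Spec_parse_redis_config_from_env
  unfold parse_redis_config_from_env parse_redis_config_from_env_alt
  have hinit : (PySem.Dict.ofList [("host", ""), ("port", ""), ("password", "")] : PySem.Dict String String)
      = PySem.Dict.mk [("host", ""), ("port", ""), ("password", "")] := by decide
  rw [hinit, pv_foldA]
  simp only [pv_lastValue_eq_firstOpt, pvFirstOpt_rev]
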